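-- pv_equiv track=rewrite | github.com/rikardwho/CS106A---Final-Project-Yahtzee | Yahtzee.py | hand
-- ===== SOURCE A (Python) =====
-- NUM_SIDES = 6
--
-- def hand(dice):
--     pairs = 0
--     tress = 0
--     quad = 0
--     fives = 0
--
--     for i in range(NUM_SIDES):
--         if dice.count(i + 1) == 5:
--             fives += 1
--         if dice.count(i + 1) == 4:
--             quad += 1
--         if dice.count(i + 1) == 3:
--             tress += 1
--         if dice.count(i + 1) == 2:
--             pairs += 1
--
--     if fives:
--         return 'Yahtzee'
--     elif tress and pairs:
--         return 'Full House'
--     elif quad: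
--         return 'Four of a kind'
--     elif tress:
--         return 'Three of a kind'
--     elif pairs == 2:
--         return 'Two pairs'
--     elif pairs == 1:
--         return 'One pair'
--     elif dice.count(1) == 0:
--         return 'High Straight'
--     elif dice.count(6) == 0:
--         return 'Low Straight'
--     else:
--         return "You've got nothing"
-- ===== SOURCE B (Python) =====
-- def hand(dice):
--     # sort the in-range dice once, then classify from run lengths in a single scan
--     vals = sorted(x for x in dice if 1 <= x and x <= 6)
--     tally = [0, 0, 0, 0]  # number of runs of length exactly 2, 3, 4, 5
--     run = 0
--     prev = None
--     for x in vals: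
--         if x == prev:
--             run += 1
--         else:
--             if 2 <= run <= 5:
--                 tally[run - 2] += 1
--             run = 1
--             prev = x
--     if 2 <= run <= 5:
--         tally[run - 2] += 1
--     pairs, tress, quad, fives = tally
--     if fives:
--         return 'Yahtzee'
--     if tress and pairs:
--         return 'Full House'
--     if quad:
--         return 'Four of a kind'
--     if tress:
--         return 'Three of a kind'
--     if pairs == 2:
--         return 'Two pairs'
--     if pairs == 1:
--         return 'One pair'
--     if not vals or vals[0] != 1:
--         return 'High Straight'
--     if vals[-1] != 6:
--         return 'Low Straight'
--     return "You've got nothing"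
-- ===== Notes on version B (the rewrite author's own statement) =====
-- stated objective: alternative
-- what changed: B sorts the in-range dice once and classifies from run lengths in a single scan over the sorted list (straights read off the first/last sorted element), instead of A's six full dice.count rescans per side plus two more for the straights.
import Mathlib
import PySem

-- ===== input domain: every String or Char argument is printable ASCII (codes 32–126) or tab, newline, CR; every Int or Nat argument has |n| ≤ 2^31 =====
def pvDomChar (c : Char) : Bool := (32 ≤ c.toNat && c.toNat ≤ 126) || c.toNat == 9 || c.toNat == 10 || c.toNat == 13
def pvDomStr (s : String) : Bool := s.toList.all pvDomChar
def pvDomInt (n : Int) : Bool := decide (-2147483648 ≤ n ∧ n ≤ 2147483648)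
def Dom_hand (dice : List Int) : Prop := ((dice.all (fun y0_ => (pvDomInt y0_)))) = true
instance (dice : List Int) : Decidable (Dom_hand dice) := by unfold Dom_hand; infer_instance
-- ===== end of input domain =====

-- B replaces A's per-side rescans of the dice (dice.count per side, plus two more for the
-- straights) with sort-once-then-scan-runs: one pass over the sorted in-range dice tallies
-- run lengths, and the straight tests read the first/last sorted element.

-- ===== PORT A =====
def hand (dice : List Int) : String :=
  let st := (PySem.List.pyRange 0 6 1).foldl
    (fun (st : Int × Int × Int × Int) i =>
      let (pairs, tress, quad, fives) := st
      let fives := if PySem.List.count dice (i + 1) = 5 then fives + 1 else fives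
      let quad  := if PySem.List.count dice (i + 1) = 4 then quad + 1 else quad
      let tress := if PySem.List.count dice (i + 1) = 3 then tress + 1 else tress
      let pairs := if PySem.List.count dice (i + 1) = 2 then pairs + 1 else pairs
      (pairs, tress, quad, fives)) (0, 0, 0, 0)
  let pairs := st.1
  let tress := st.2.1
  let quad  := st.2.2.1
  let fives := st.2.2.2
  if fives ≠ 0 then "Yahtzee"
  else if tress ≠ 0 ∧ pairs ≠ 0 then "Full House"
  else if quad ≠ 0 then "Four of a kind"
  else if tress ≠ 0 then "Three of a kind"
  else if pairs = 2 then "Two pairs"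
  else if pairs = 1 then "One pair"
  else if PySem.List.count dice 1 = 0 then "High Straight"
  else if PySem.List.count dice 6 = 0 then "Low Straight"
  else "You've got nothing"

-- ===== PORT B =====
-- tally[run - 2] += 1 is ported with set/getD, exact here: the guard 2 <= run <= 5 keeps the
-- index in range; vals[0] / vals[-1] are pyGet?, reached only behind the emptiness test.
def hand_alt (dice : List Int) : String :=
  let vals := PySem.List.sorted (dice.filter (fun x => decide (1 ≤ x) && decide (x ≤ 6))) (fun x => x) false
  let st := vals.foldl
    (fun (st : Option Int × Int × List Int) x =>
      let (prev, run, tally) := st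
      if some x = prev then (prev, run + 1, tally)
      else ((some x : Option Int), (1 : Int),
        if 2 ≤ run ∧ run ≤ 5 then tally.set (run - 2).toNat (tally.getD (run - 2).toNat 0 + 1) else tally))
    ((none : Option Int), (0 : Int), ([0, 0, 0, 0] : List Int))
  let tally := if 2 ≤ st.2.1 ∧ st.2.1 ≤ 5 then st.2.2.set (st.2.1 - 2).toNat (st.2.2.getD (st.2.1 - 2).toNat 0 + 1) else st.2.2
  let pairs := tally.getD 0 0
  let tress := tally.getD 1 0
  let quad  := tally.getD 2 0
  let fives := tally.getD 3 0
  if fives ≠ 0 then "Yahtzee"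
  else if tress ≠ 0 ∧ pairs ≠ 0 then "Full House"
  else if quad ≠ 0 then "Four of a kind"
  else if tress ≠ 0 then "Three of a kind"
  else if pairs = 2 then "Two pairs"
  else if pairs = 1 then "One pair"
  else if vals = [] ∨ PySem.List.pyGet? vals 0 ≠ some 1 then "High Straight"
  else if PySem.List.pyGet? vals (-1) ≠ some 6 then "Low Straight"
  else "You've got nothing"

-- ===== PRECONDITION & SPEC =====
def Spec_hand (dice : List Int) (out : String) : Prop := out = hand_alt dice
instance (dice : List Int) (out : String) : Decidable (Spec_hand dice out) := by unfold Spec_hand; infer_instance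

-- ===== CLAIM (what is proved, stated in full; the proofs are below) =====
def Claim_equal_hand : Prop := ∀ (dice : List Int), Dom_hand dice → Spec_hand dice (hand dice)

-- ===== LEMMAS AND PROOFS =====

-- proof-side names for B's loop body and flush (definitionally the inline code of hand_alt)
def pvFlush (run : Int) (tally : List Int) : List Int :=
  if 2 ≤ run ∧ run ≤ 5 then tally.set (run - 2).toNat (tally.getD (run - 2).toNat 0 + 1) else tally

def pvF (st : Option Int × Int × List Int) (x : Int) : Option Int × Int × List Int :=
  let (prev, run, tally) := st
  if some x = prev then (prev, run + 1, tally)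
  else ((some x : Option Int), (1 : Int),
    if 2 ≤ run ∧ run ≤ 5 then tally.set (run - 2).toNat (tally.getD (run - 2).toNat 0 + 1) else tally)

theorem pvF_eq :
    (fun (st : Option Int × Int × List Int) (x : Int) =>
      let (prev, run, tally) := st
      if some x = prev then (prev, run + 1, tally)
      else ((some x : Option Int), (1 : Int),
        if 2 ≤ run ∧ run ≤ 5 then tally.set (run - 2).toNat (tally.getD (run - 2).toNat 0 + 1) else tally)) = pvF := rfl

-- indicator of a run of length exactly n
def pvE (k : Int) (n : Int) : Int := if k = n then 1 else 0

theorem pvFlush_quad (run a b c d : Int) :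
    pvFlush run [a, b, c, d] = [a + pvE run 2, b + pvE run 3, c + pvE run 4, d + pvE run 5] := by
  by_cases h : 2 ≤ run ∧ run ≤ 5
  · obtain ⟨h1, h2⟩ := h
    interval_cases run <;> simp [pvFlush, pvE]
  · have h2 : run ≠ 2 := by rintro rfl; exact h ⟨by norm_num, by norm_num⟩
    have h3 : run ≠ 3 := by rintro rfl; exact h ⟨by norm_num, by norm_num⟩
    have h4 : run ≠ 4 := by rintro rfl; exact h ⟨by norm_num, by norm_num⟩
    have h5 : run ≠ 5 := by rintro rfl; exact h ⟨by norm_num, by norm_num⟩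
    simp [pvFlush, h, pvE, h2, h3, h4, h5]

theorem pvF_replicate_same (v : Int) (k : Nat) (r : Int) (t : List Int) :
    List.foldl pvF (some v, r, t) (List.replicate k v) = (some v, r + k, t) := by
  induction k generalizing r with
  | zero => simp
  | succ k ih =>
    rw [List.replicate_succ, List.foldl_cons]
    show List.foldl pvF (pvF (some v, r, t) v) _ = _
    simp only [pvF]
    rw [if_pos trivial, ih]
    push_cast; ring_nf

theorem pvF_block (v : Int) (k : Nat) (hk : k ≠ 0) (prev : Option Int) (hne : prev ≠ some v)
    (run : Int) (t : List Int) :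
    List.foldl pvF (prev, run, t) (List.replicate k v) = (some v, (k : Int), pvFlush run t) := by
  obtain ⟨k, rfl⟩ := Nat.exists_eq_succ_of_ne_zero hk
  rw [List.replicate_succ, List.foldl_cons]
  have hstep : pvF (prev, run, t) v = (some v, 1, pvFlush run t) := by
    simp only [pvF, pvFlush]
    rw [if_neg (fun h => hne h.symm)]
  rw [hstep, pvF_replicate_same]
  push_cast; ring_nf

def pvFin (st : Option Int × Int × List Int) : List Int := pvFlush st.2.1 st.2.2

theorem pvFin_eq (st : Option Int × Int × List Int) :
    (if 2 ≤ st.2.1 ∧ st.2.1 ≤ 5 then st.2.2.set (st.2.1 - 2).toNat (st.2.2.getD (st.2.1 - 2).toNat 0 + 1) else st.2.2)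
    = pvFin st := rfl

-- the chain of blocks processed by B's loop, with the trailing flush applied
theorem pvMain (bs : List (Int × Nat)) (prev : Option Int) (run a b c d : Int)
    (hne : ∀ p ∈ bs, prev ≠ some p.1)
    (hpw : (bs.map Prod.fst).Pairwise (· ≠ ·)) :
    pvFin (List.foldl pvF (prev, run, [a, b, c, d]) ((bs.map (fun p => List.replicate p.2 p.1)).flatten)) =
    [a + pvE run 2 + (bs.map (fun p => pvE (p.2 : Int) 2)).sum,
     b + pvE run 3 + (bs.map (fun p => pvE (p.2 : Int) 3)).sum,
     c + pvE run 4 + (bs.map (fun p => pvE (p.2 : Int) 4)).sum,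
     d + pvE run 5 + (bs.map (fun p => pvE (p.2 : Int) 5)).sum] := by
  induction bs generalizing prev run a b c d with
  | nil => simp [pvFin, pvFlush_quad]
  | cons p bs ih =>
    obtain ⟨v, k⟩ := p
    simp only [List.map_cons, List.flatten_cons, List.foldl_append]
    by_cases hk : k = 0
    · subst hk
      simp only [List.replicate_zero, List.foldl_nil]
      rw [ih prev run a b c d (fun q hq => hne q (List.mem_cons_of_mem _ hq)) (List.pairwise_cons.mp hpw).2]
      simp [pvE]
    · rw [pvF_block v k hk prev (hne (v, k) (List.mem_cons_self)) run [a, b, c, d], pvFlush_quad]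
      rw [ih (some v) (k : Int) _ _ _ _ ?_ (List.pairwise_cons.mp hpw).2]
      · simp only [List.sum_cons]; ring_nf
      · intro q hq hsome
        have := (List.pairwise_cons.mp hpw).1 q.1 (List.mem_map_of_mem hq)
        exact this (Option.some.inj hsome)

-- the six value blocks of the sorted in-range list
def pvBS (f : List Int) : List (Int × Nat) :=
  [(1, f.count 1), (2, f.count 2), (3, f.count 3), (4, f.count 4), (5, f.count 5), (6, f.count 6)]

def pvBlocks (f : List Int) : List Int :=
  ((pvBS f).map (fun p => List.replicate p.2 p.1)).flatten

theorem pvBlocks_perm (f : List Int) (hf : ∀ x ∈ f, 1 ≤ x ∧ x ≤ 6) :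
    (pvBlocks f).Perm f := by
  rw [List.perm_iff_count]
  intro v
  by_cases h1 : v = 1
  · subst h1; simp [pvBlocks, pvBS, List.count_replicate]
  by_cases h2 : v = 2
  · subst h2; simp [pvBlocks, pvBS, List.count_replicate]
  by_cases h3 : v = 3
  · subst h3; simp [pvBlocks, pvBS, List.count_replicate]
  by_cases h4 : v = 4
  · subst h4; simp [pvBlocks, pvBS, List.count_replicate]
  by_cases h5 : v = 5
  · subst h5; simp [pvBlocks, pvBS, List.count_replicate]
  by_cases h6 : v = 6
  · subst h6; simp [pvBlocks, pvBS, List.count_replicate]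
  · have hv : v ∉ f := fun hv => by
      rcases hf v hv with ⟨ha, hb⟩
      interval_cases v <;> simp_all
    rw [List.count_eq_zero_of_not_mem hv, List.count_eq_zero_of_not_mem]
    intro hmem
    simp [pvBlocks, pvBS, List.mem_replicate] at hmem
    rcases hmem with ⟨_, h⟩ | ⟨_, h⟩ | ⟨_, h⟩ | ⟨_, h⟩ | ⟨_, h⟩ | ⟨_, h⟩ <;> simp_all

theorem pvBlocks_pairwise (f : List Int) : (pvBlocks f).Pairwise (· ≤ ·) := by
  simp only [pvBlocks, pvBS, List.map_cons, List.map_nil, List.flatten]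
  simp [List.pairwise_append, List.pairwise_replicate, List.mem_replicate]
  refine ⟨⟨⟨?_, ?_⟩, ?_⟩, ?_⟩ <;> intro _ b hb <;> omega

theorem pvHigh_iff (f : List Int) :
    (pvBlocks f = [] ∨ PySem.List.pyGet? (pvBlocks f) 0 ≠ some 1) ↔ f.count 1 = 0 := by
  constructor
  · intro h
    by_contra hc
    obtain ⟨k, hk⟩ := Nat.exists_eq_succ_of_ne_zero hc
    have hb : pvBlocks f = 1 :: (List.replicate k 1 ++ (pvBS f).tail.flatMap (fun p => List.replicate p.2 p.1)) := by
      simp [pvBlocks, pvBS, hk, List.replicate_succ, List.flatten]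
    rcases h with h | h
    · rw [hb] at h; exact List.cons_ne_nil _ _ h
    · rw [hb] at h; exact h (by simp [PySem.List.pyGet?_zero_cons])
  · intro h
    by_cases hnil : pvBlocks f = []
    · exact Or.inl hnil
    · right
      intro hget
      have h1 : (1 : Int) ∈ pvBlocks f := PySem.List.mem_of_pyGet?_eq_some _ hget
      simp [pvBlocks, pvBS, List.mem_replicate, h] at h1

theorem pvLow_iff (f : List Int) :
    (PySem.List.pyGet? (pvBlocks f) (-1) ≠ some 6) ↔ f.count 6 = 0 := by
  rw [PySem.List.pyGet?_neg_one]
  constructor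
  · intro h
    by_contra hc
    obtain ⟨k, hk⟩ := Nat.exists_eq_succ_of_ne_zero hc
    apply h
    have : (List.replicate (k + 1) 6).getLast? = some 6 := by
      simp [List.getLast?_replicate]
    simp [pvBlocks, pvBS, hk, List.flatten, List.getLast?_append]
    simp [List.getLast?_replicate]
  · intro h hget
    have h6 : (6 : Int) ∈ pvBlocks f := List.mem_of_getLast? hget
    simp [pvBlocks, pvBS, List.mem_replicate, h] at h6

theorem pvLow_iff' (f : List Int) :
    (PySem.List.pyGet? (pvBlocks f) (-1) = some 6) ↔ ¬ f.count 6 = 0 := by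
  have h := pvLow_iff f
  tauto

theorem pvMain' (f : List Int) :
    pvFin (List.foldl pvF (none, 0, [0, 0, 0, 0]) (pvBlocks f)) =
    [pvE (f.count 1) 2 + pvE (f.count 2) 2 + pvE (f.count 3) 2 + pvE (f.count 4) 2 + pvE (f.count 5) 2 + pvE (f.count 6) 2,
     pvE (f.count 1) 3 + pvE (f.count 2) 3 + pvE (f.count 3) 3 + pvE (f.count 4) 3 + pvE (f.count 5) 3 + pvE (f.count 6) 3,
     pvE (f.count 1) 4 + pvE (f.count 2) 4 + pvE (f.count 3) 4 + pvE (f.count 4) 4 + pvE (f.count 5) 4 + pvE (f.count 6) 4,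
     pvE (f.count 1) 5 + pvE (f.count 2) 5 + pvE (f.count 3) 5 + pvE (f.count 4) 5 + pvE (f.count 5) 5 + pvE (f.count 6) 5] := by
  have hne : ∀ p ∈ pvBS f, (none : Option Int) ≠ some p.1 := by intro p _; simp
  have hpw : ((pvBS f).map Prod.fst).Pairwise (· ≠ ·) := by simp [pvBS]
  have := pvMain (pvBS f) none 0 0 0 0 0 hne hpw
  rw [show ((pvBS f).map (fun p => List.replicate p.2 p.1)).flatten = pvBlocks f from rfl] at this
  rw [this]
  simp [pvBS, pvE]
  refine ⟨?_, ?_, ?_, ?_⟩ <;> ring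

-- ===== VERDICT (by name: the statement is the Claim_ definition above) =====
theorem hand_spec : Claim_equal_hand := by
  intro dice _
  unfold Spec_hand hand hand_alt
  have hf : ∀ x ∈ dice.filter (fun x => decide (1 ≤ x) && decide (x ≤ 6)), 1 ≤ x ∧ x ≤ 6 := by
    intro x hx
    have := (List.mem_filter.mp hx).2
    simpa using this
  have hvals : PySem.List.sorted (dice.filter (fun x => decide (1 ≤ x) && decide (x ≤ 6))) (fun x => x) false
      = pvBlocks (dice.filter (fun x => decide (1 ≤ x) && decide (x ≤ 6))) :=
    PySem.List.sorted_id_eq_of_perm_of_pairwise _ _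
      (pvBlocks_perm _ hf) (pvBlocks_pairwise _)
  rw [hvals, pvF_eq]
  simp only []
  rw [pvFin_eq, pvMain']
  rw [show PySem.List.pyRange 0 6 1 = [0, 1, 2, 3, 4, 5] from by decide]
  simp only [List.foldl_cons, List.foldl_nil]
  norm_num
  have hc : ∀ i : Int, 1 ≤ i ∧ i ≤ 6 → List.count i dice
      = (dice.filter (fun x => decide (1 ≤ x) && decide (x ≤ 6))).count i := by
    intro i hi
    exact (List.count_filter (by simpa using hi)).symm
  simp only [hc 1 (by norm_num), hc 2 (by norm_num), hc 3 (by norm_num), hc 4 (by norm_num),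
      hc 5 (by norm_num), hc 6 (by norm_num)]
  simp only [pvHigh_iff, pvLow_iff']
  simp [pvE]
  simp only [show ∀ (c : Prop) (h : Decidable c) (x : Int), (if c then x + 1 else x) = x + (if c then 1 else 0) from
      fun c h x => by split <;> ring,
    show ∀ n : ℕ, ((n : ℤ) = 5) ↔ n = 5 from fun n => by omega,
    show ∀ n : ℕ, ((n : ℤ) = 4) ↔ n = 4 from fun n => by omega,
    show ∀ n : ℕ, ((n : ℤ) = 3) ↔ n = 3 from fun n => by omega,
    show ∀ n : ℕ, ((n : ℤ) = 2) ↔ n = 2 from fun n => by omega]
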